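-- pv_equiv track=rewrite | github.com/dewanthenmalai/AdventOfCodeDewan | 2024/Day20/Puzzle2.py | evaluate_shortcuts
-- ===== SOURCE A (Python) =====
-- from collections import defaultdict
--
-- def grid_get(grid, pos):
--     if 0 <= pos[0] < len(grid[0]) and 0 <= pos[1] < len(grid):
--         return grid[pos[1]][pos[0]]
--     return '_'
--
-- def manhattan_circle(center, radius, grid):
--     circle = []
--     for x in range(center[0]-radius,center[0]+radius+1):
--         for y in range(center[1]-radius,center[1]+radius+1):
--             if (abs(center[0]-x) + abs(center[1]-y)) == radius:
--                 if 0 <= x < len(grid[0]) and 0 <= y < len(grid):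
--                     circle.append((x,y))
--     return circle
--
-- def evaluate_shortcuts(pos, path, grid):
--     saved_times = defaultdict(int)
--     for i in range(2,21):
--         for c in manhattan_circle(pos,i,grid):
--             if grid_get(grid, c) in 'SE.' and c in path:
--                 if path.index(pos) < path.index(c):
--                     saved_time = path.index(c) - path.index(pos) - i
--                     saved_times[saved_time] += 1
--     return saved_times
-- ===== SOURCE B (Python) =====
-- def evaluate_shortcuts(pos, path, grid):
--     # Walk each diamond perimeter directly instead of
--     # scanning the whole box and filtering by manhattan distance.
--     saved_times = {}
--     for i in range(2, 21):
--         for dx in range(-i, i + 1):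
--             d = i - abs(dx)
--             x = pos[0] + dx
--             for y in ((pos[1],) if d == 0 else (pos[1] - d, pos[1] + d)):
--                 if 0 <= x < len(grid[0]) and 0 <= y < len(grid):
--                     c = (x, y)
--                     if grid[y][x] in 'SE.' and c in path:
--                         if path.index(pos) < path.index(c):
--                             k = path.index(c) - path.index(pos) - i
--                             saved_times[k] = saved_times.get(k, 0) + 1
--     return saved_times
-- ===== Notes on version B (the rewrite author's own statement) =====
-- stated objective: alternative
-- what changed: Replaces A's per-radius manhattan_circle construction, which scans the whole (2i+1)x(2i+1) box and keeps cells at manhattan distance i, with a direct walk of each diamond perimeter (for each dx the one or two matching ys), visiting the same cells in the same order with the same per-cell checks and dict updates.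
import Mathlib
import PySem

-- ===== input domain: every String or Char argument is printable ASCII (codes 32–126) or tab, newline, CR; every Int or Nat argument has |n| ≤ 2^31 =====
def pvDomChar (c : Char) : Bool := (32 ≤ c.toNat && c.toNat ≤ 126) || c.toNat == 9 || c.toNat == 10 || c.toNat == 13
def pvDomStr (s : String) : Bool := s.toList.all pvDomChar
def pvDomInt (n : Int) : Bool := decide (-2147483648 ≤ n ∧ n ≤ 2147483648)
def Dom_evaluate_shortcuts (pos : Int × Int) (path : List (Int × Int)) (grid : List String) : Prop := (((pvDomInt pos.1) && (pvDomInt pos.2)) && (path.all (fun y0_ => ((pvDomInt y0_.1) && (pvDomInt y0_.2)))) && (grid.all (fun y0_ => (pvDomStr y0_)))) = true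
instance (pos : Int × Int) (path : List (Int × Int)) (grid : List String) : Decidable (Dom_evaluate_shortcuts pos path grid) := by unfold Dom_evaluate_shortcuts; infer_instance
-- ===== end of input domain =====

-- B walks each diamond perimeter directly (for each dx the one or two matching ys) instead of
-- building manhattan_circle by scanning the whole box and filtering; same checks, same order.

-- ===== PORT A =====

-- len(grid[0]) : Python raises IndexError on grid = [] — excluded by Pre_ (the .getD "" default is never hit inside Pre_)
def pvRow0Len (grid : List String) : Int := PySem.Str.len ((PySem.List.pyGet? grid 0).getD "")

-- grid[pos[1]][pos[0]] is in range whenever the guard holds and rows are no shorter than row 0 (Pre_);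
-- the membership `ch in 'SE.'` for a single character is ported as list membership of the char — exact for 1-char strings.
def grid_get (grid : List String) (pos : Int × Int) : Char :=
  if 0 ≤ pos.1 ∧ pos.1 < pvRow0Len grid ∧ 0 ≤ pos.2 ∧ pos.2 < (grid.length : Int) then
    (PySem.Str.pyGet? ((PySem.List.pyGet? grid pos.2).getD "") pos.1).getD '_'
  else '_'

def manhattan_circle (center : Int × Int) (radius : Int) (grid : List String) : List (Int × Int) :=
  (PySem.List.pyRange (center.1 - radius) (center.1 + radius + 1) 1).foldl (fun circle x =>
    (PySem.List.pyRange (center.2 - radius) (center.2 + radius + 1) 1).foldl (fun circle y =>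
      if |center.1 - x| + |center.2 - y| = radius then
        if 0 ≤ x ∧ x < pvRow0Len grid ∧ 0 ≤ y ∧ y < (grid.length : Int) then circle ++ [(x, y)]
        else circle
      else circle) circle) []

-- path.index(v) : ValueError when v ∉ path is excluded by Pre_ (the .getD 0 default is never hit inside Pre_);
-- defaultdict(int) increment d[k] += 1 is Dict.modify k 0 (· + 1); the returned dict is its items list.
def evaluate_shortcuts (pos : Int × Int) (path : List (Int × Int)) (grid : List String) : List (Int × Int) :=
  ((PySem.List.pyRange 2 21 1).foldl (fun saved_times i =>
    (manhattan_circle pos i grid).foldl (fun saved_times c =>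
      if grid_get grid c ∈ "SE.".toList ∧ c ∈ path then
        if ((PySem.List.index? path pos).getD 0 : Int) < ((PySem.List.index? path c).getD 0 : Int) then
          saved_times.modify (((PySem.List.index? path c).getD 0 : Int) - ((PySem.List.index? path pos).getD 0 : Int) - i) 0 (· + 1)
        else saved_times
      else saved_times) saved_times) PySem.Dict.empty).items

-- ===== PORT B =====

-- transliteration of Source B: walk each diamond perimeter (dx, then the 1 or 2 matching ys) directly;
-- plain-dict increment d[k] = d.get(k, 0) + 1 is Dict.insert k (Dict.getD k 0 + 1).
def evaluate_shortcuts_alt (pos : Int × Int) (path : List (Int × Int)) (grid : List String) : List (Int × Int) :=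
  ((PySem.List.pyRange 2 21 1).foldl (fun saved_times i =>
    (PySem.List.pyRange (-i) (i + 1) 1).foldl (fun saved_times dx =>
      let d := i - |dx|
      let x := pos.1 + dx
      (if d = 0 then [pos.2] else [pos.2 - d, pos.2 + d]).foldl (fun saved_times y =>
        if 0 ≤ x ∧ x < pvRow0Len grid ∧ 0 ≤ y ∧ y < (grid.length : Int) then
          if (PySem.Str.pyGet? ((PySem.List.pyGet? grid y).getD "") x).getD '_' ∈ "SE.".toList ∧ (x, y) ∈ path then
            if ((PySem.List.index? path pos).getD 0 : Int) < ((PySem.List.index? path (x, y)).getD 0 : Int) then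
              saved_times.insert (((PySem.List.index? path (x, y)).getD 0 : Int) - ((PySem.List.index? path pos).getD 0 : Int) - i)
                (saved_times.getD (((PySem.List.index? path (x, y)).getD 0 : Int) - ((PySem.List.index? path pos).getD 0 : Int) - i) 0 + 1)
            else saved_times
          else saved_times
        else saved_times) saved_times) saved_times) PySem.Dict.empty).items

-- ===== PRECONDITION & SPEC =====

-- Pre_ excludes exactly the inputs on which the Python A raises: grid = [] (IndexError on grid[0]);
-- an in-bounds cell within manhattan distance 2..20 of pos whose row is shorter than row 0 (IndexError);
-- and pos ∉ path while some candidate cell on the path matches (ValueError from path.index(pos)).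
def Pre_evaluate_shortcuts (pos : Int × Int) (path : List (Int × Int)) (grid : List String) : Prop :=
  grid ≠ [] ∧
  (∀ dx ∈ PySem.List.pyRange (-20) 21 1, ∀ dy ∈ PySem.List.pyRange (-20) 21 1,
    (2 ≤ |dx| + |dy| ∧ |dx| + |dy| ≤ 20 ∧
     0 ≤ pos.1 + dx ∧ pos.1 + dx < pvRow0Len grid ∧ 0 ≤ pos.2 + dy ∧ pos.2 + dy < (grid.length : Int)) →
    pos.1 + dx < PySem.Str.len ((PySem.List.pyGet? grid (pos.2 + dy)).getD "")) ∧
  (pos ∈ path ∨ ∀ c ∈ path,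
    ¬ (2 ≤ |pos.1 - c.1| + |pos.2 - c.2| ∧ |pos.1 - c.1| + |pos.2 - c.2| ≤ 20 ∧
       0 ≤ c.1 ∧ c.1 < pvRow0Len grid ∧ 0 ≤ c.2 ∧ c.2 < (grid.length : Int) ∧
       (PySem.Str.pyGet? ((PySem.List.pyGet? grid c.2).getD "") c.1).getD '_' ∈ "SE.".toList))

instance (pos : Int × Int) (path : List (Int × Int)) (grid : List String) : Decidable (Pre_evaluate_shortcuts pos path grid) := by unfold Pre_evaluate_shortcuts; infer_instance

def pvWitness_evaluate_shortcuts : (Int × Int) × (List (Int × Int)) × List String :=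
  ((1, 0), [(1, 0), (1, 1), (1, 2), (1, 3), (2, 3), (3, 3), (3, 2), (3, 1), (3, 0)],
   ["#.#.#", "#.#.#", "#.#.#", "#...#"])

def Spec_evaluate_shortcuts (pos : Int × Int) (path : List (Int × Int)) (grid : List String) (out : List (Int × Int)) : Prop := out = evaluate_shortcuts_alt pos path grid
instance (pos : Int × Int) (path : List (Int × Int)) (grid : List String) (out : List (Int × Int)) : Decidable (Spec_evaluate_shortcuts pos path grid out) := by unfold Spec_evaluate_shortcuts; infer_instance

-- ===== CLAIM (what is proved, stated in full; the proofs are below) =====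
def Claim_equal_evaluate_shortcuts : Prop := ∀ (pos : Int × Int) (path : List (Int × Int)) (grid : List String), Dom_evaluate_shortcuts pos path grid → Pre_evaluate_shortcuts pos path grid → Spec_evaluate_shortcuts pos path grid (evaluate_shortcuts pos path grid)

-- ===== LEMMAS AND PROOFS =====

-- the common per-cell action (char check, path membership, index comparison, counter bump), B's literal form
def pvCell (pos : Int × Int) (path : List (Int × Int)) (grid : List String) (i : Int)
    (st : PySem.Dict Int Int) (c : Int × Int) : PySem.Dict Int Int :=
  if (PySem.Str.pyGet? ((PySem.List.pyGet? grid c.2).getD "") c.1).getD '_' ∈ "SE.".toList ∧ c ∈ path then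
    if ((PySem.List.index? path pos).getD 0 : Int) < ((PySem.List.index? path c).getD 0 : Int) then
      st.insert (((PySem.List.index? path c).getD 0 : Int) - ((PySem.List.index? path pos).getD 0 : Int) - i)
        (st.getD (((PySem.List.index? path c).getD 0 : Int) - ((PySem.List.index? path pos).getD 0 : Int) - i) 0 + 1)
    else st
  else st

-- the diamond perimeter at radius i, bounds-filtered, in A's (x asc, y asc) = B's (dx asc, ys asc) order
def pvCells (pos : Int × Int) (i : Int) (grid : List String) : List (Int × Int) :=
  (PySem.List.pyRange (-i) (i + 1) 1).flatMap (fun dx =>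
    ((if i - |dx| = 0 then [pos.2] else [pos.2 - (i - |dx|), pos.2 + (i - |dx|)]).filter
      (fun y => decide (0 ≤ pos.1 + dx ∧ pos.1 + dx < pvRow0Len grid ∧ 0 ≤ y ∧ y < (grid.length : Int)))).map
      (fun y => (pos.1 + dx, y)))

lemma pv_filter_abs (cy i d : Int) (h0 : 0 ≤ d) (hd : d ≤ i) :
    (PySem.List.pyRange (cy - i) (cy + i + 1) 1).filter (fun y => decide (|cy - y| = d))
      = if d = 0 then [cy] else [cy - d, cy + d] := by
  have hs1 : PySem.List.pyRange (cy - i) (cy + i + 1) 1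
      = PySem.List.pyRange (cy - i) (cy - d) 1 ++ PySem.List.pyRange (cy - d) (cy + d + 1) 1
        ++ PySem.List.pyRange (cy + d + 1) (cy + i + 1) 1 := by
    have h1 := PySem.List.pyRange_one_append (cy - i) (cy - d) (cy + i + 1) (by omega) (by omega)
    have h2 := PySem.List.pyRange_one_append (cy - d) (cy + d + 1) (cy + i + 1) (by omega) (by omega)
    rw [h1, h2, List.append_assoc]
  have hlo : (PySem.List.pyRange (cy - i) (cy - d) 1).filter (fun y => decide (|cy - y| = d)) = [] := by
    refine List.filter_eq_nil_iff.mpr ?_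
    intro y hy
    rw [PySem.List.mem_pyRange_one] at hy
    simp only [decide_eq_true_eq]
    rcases abs_cases (cy - y) with ⟨h, _⟩ | ⟨h, _⟩ <;> omega
  have hhi : (PySem.List.pyRange (cy + d + 1) (cy + i + 1) 1).filter (fun y => decide (|cy - y| = d)) = [] := by
    refine List.filter_eq_nil_iff.mpr ?_
    intro y hy
    rw [PySem.List.mem_pyRange_one] at hy
    simp only [decide_eq_true_eq]
    rcases abs_cases (cy - y) with ⟨h, _⟩ | ⟨h, _⟩ <;> omega
  rw [hs1, List.filter_append, List.filter_append, hlo, hhi, List.nil_append, List.append_nil]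
  by_cases hd0 : d = 0
  · subst hd0
    have : PySem.List.pyRange (cy - 0) (cy + 0 + 1) 1 = [cy] := by
      rw [show cy - 0 = cy by ring, show cy + 0 + 1 = cy + 1 by ring, PySem.List.pyRange_one_singleton]
    rw [this]
    simp
  · have hdpos : 0 < d := by omega
    have hcons : PySem.List.pyRange (cy - d) (cy + d + 1) 1
        = (cy - d) :: (PySem.List.pyRange (cy - d + 1) (cy + d) 1 ++ [cy + d]) := by
      rw [PySem.List.pyRange_one_cons (by omega), show cy + d + 1 = (cy + d) + 1 by ring,
        PySem.List.pyRange_one_succ_right (by omega)]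
    rw [hcons]
    have hmid : (PySem.List.pyRange (cy - d + 1) (cy + d) 1).filter (fun y => decide (|cy - y| = d)) = [] := by
      refine List.filter_eq_nil_iff.mpr ?_
      intro y hy
      rw [PySem.List.mem_pyRange_one] at hy
      simp only [decide_eq_true_eq]
      rcases abs_cases (cy - y) with ⟨h, _⟩ | ⟨h, _⟩ <;> omega
    have e1 : |cy - (cy - d)| = d := by rw [show cy - (cy - d) = d by ring]; exact abs_of_nonneg h0
    have e2 : |cy - (cy + d)| = d := by rw [show cy - (cy + d) = -d by ring]; rw [abs_neg]; exact abs_of_nonneg h0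
    rw [List.filter_cons, List.filter_append, hmid]
    simp only [List.filter_cons, List.filter_nil, e1, e2, decide_eq_true_eq, if_neg hd0]
    simp

lemma pv_circle_eq (pos : Int × Int) (i : Int) (grid : List String) :
    manhattan_circle pos i grid = pvCells pos i grid := by
  unfold manhattan_circle pvCells
  -- collapse the nested ifs of the inner loop body into one condition
  have hbody : ∀ (circle : List (Int × Int)) (x y : Int),
      (if |pos.1 - x| + |pos.2 - y| = i then
        if 0 ≤ x ∧ x < pvRow0Len grid ∧ 0 ≤ y ∧ y < (grid.length : Int) then circle ++ [(x, y)]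
        else circle
      else circle)
      = (if (|pos.1 - x| + |pos.2 - y| = i) ∧ (0 ≤ x ∧ x < pvRow0Len grid ∧ 0 ≤ y ∧ y < (grid.length : Int))
          then circle ++ [(x, y)] else circle) := by
    intro circle x y
    split_ifs <;> tauto
  simp only [hbody]
  -- each loop body appends, so the nest is a flatMap of filters
  have hinner : ∀ (circle : List (Int × Int)) (x : Int),
      (PySem.List.pyRange (pos.2 - i) (pos.2 + i + 1) 1).foldl (fun circle y =>
        if (|pos.1 - x| + |pos.2 - y| = i) ∧ (0 ≤ x ∧ x < pvRow0Len grid ∧ 0 ≤ y ∧ y < (grid.length : Int))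
          then circle ++ [(x, y)] else circle) circle
      = circle ++ ((PySem.List.pyRange (pos.2 - i) (pos.2 + i + 1) 1).filter
          (fun y => decide ((|pos.1 - x| + |pos.2 - y| = i) ∧ (0 ≤ x ∧ x < pvRow0Len grid ∧ 0 ≤ y ∧ y < (grid.length : Int))))).map
          (fun y => (x, y)) := by
    intro circle x
    exact PySem.List.foldl_append_ite _ _ _ _
  simp only [hinner]
  rw [PySem.List.foldl_append_eq_flatMap]
  rw [List.nil_append]
  -- shift the outer range to offsets
  have hshift : PySem.List.pyRange (pos.1 - i) (pos.1 + i + 1) 1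
      = (PySem.List.pyRange (-i) (i + 1) 1).map (fun dx => pos.1 + dx) := by
    rw [PySem.List.pyRange_one, PySem.List.pyRange_one]
    rw [show pos.1 + i + 1 - (pos.1 - i) = 2 * i + 1 by ring, show i + 1 - -i = 2 * i + 1 by ring]
    rw [List.map_map]
    refine List.map_congr_left ?_
    intro k _
    simp only [Function.comp]
    ring
  rw [hshift, List.flatMap_map]
  rw [List.flatMap_def, List.flatMap_def]
  refine congrArg List.flatten ?_
  refine List.map_congr_left ?_
  intro dx hdx
  rw [PySem.List.mem_pyRange_one] at hdx
  have habs : |dx| ≤ i := by rcases abs_cases dx with ⟨h, _⟩ | ⟨h, _⟩ <;> omega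
  have habs0 : 0 ≤ i - |dx| := by omega
  -- the radius condition at column pos.1 + dx pins |pos.2 - y| = i - |dx|
  have hx : |pos.1 - (pos.1 + dx)| = |dx| := by rw [show pos.1 - (pos.1 + dx) = -dx by ring, abs_neg]
  have hcond : ∀ y : Int,
      decide ((|pos.1 - (pos.1 + dx)| + |pos.2 - y| = i) ∧ (0 ≤ pos.1 + dx ∧ pos.1 + dx < pvRow0Len grid ∧ 0 ≤ y ∧ y < (grid.length : Int)))
      = (decide (0 ≤ pos.1 + dx ∧ pos.1 + dx < pvRow0Len grid ∧ 0 ≤ y ∧ y < (grid.length : Int)) && decide (|pos.2 - y| = i - |dx|)) := by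
    intro y
    rw [hx]
    have hiff : (|dx| + |pos.2 - y| = i) ↔ (|pos.2 - y| = i - |dx|) := by omega
    simp only [Bool.decide_and, hiff]
    exact Bool.and_comm _ _

  rw [List.filter_congr (fun y _ => hcond y)]
  rw [← List.filter_filter]
  rw [pv_filter_abs pos.2 i (i - |dx|) habs0 (by have := abs_nonneg dx; omega)]

lemma pv_modify_eq_insert (d : PySem.Dict Int Int) (k : Int) :
    d.modify k 0 (· + 1) = d.insert k (d.getD k 0 + 1) := rfl

-- A's radius step over the circle is the common action over pvCells
lemma pv_stepA_eq (pos : Int × Int) (path : List (Int × Int)) (grid : List String) (i : Int)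
    (st : PySem.Dict Int Int) :
    (manhattan_circle pos i grid).foldl (fun saved_times c =>
      if grid_get grid c ∈ "SE.".toList ∧ c ∈ path then
        if ((PySem.List.index? path pos).getD 0 : Int) < ((PySem.List.index? path c).getD 0 : Int) then
          saved_times.modify (((PySem.List.index? path c).getD 0 : Int) - ((PySem.List.index? path pos).getD 0 : Int) - i) 0 (· + 1)
        else saved_times
      else saved_times) st
    = (pvCells pos i grid).foldl (pvCell pos path grid i) st := by
  rw [pv_circle_eq pos i grid]
  refine PySem.List.foldl_congr_mem _ _ _ _ ?_
  intro acc c hc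
  have hinb : 0 ≤ c.1 ∧ c.1 < pvRow0Len grid ∧ 0 ≤ c.2 ∧ c.2 < (grid.length : Int) := by
    unfold pvCells at hc
    rcases List.mem_flatMap.mp hc with ⟨dx, _, hc2⟩
    rcases List.mem_map.mp hc2 with ⟨y, hy, hcy⟩
    have := (List.mem_filter.mp hy).2
    rw [decide_eq_true_eq] at this
    rw [← hcy]
    exact this
  have hg : grid_get grid c = (PySem.Str.pyGet? ((PySem.List.pyGet? grid c.2).getD "") c.1).getD '_' := by
    unfold grid_get
    rw [if_pos hinb]
  rw [hg]
  unfold pvCell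
  rw [pv_modify_eq_insert]

-- B's radius step is the common action over pvCells
lemma pv_stepB_eq (pos : Int × Int) (path : List (Int × Int)) (grid : List String) (i : Int)
    (st : PySem.Dict Int Int) :
    (PySem.List.pyRange (-i) (i + 1) 1).foldl (fun saved_times dx =>
      let d := i - |dx|
      let x := pos.1 + dx
      (if d = 0 then [pos.2] else [pos.2 - d, pos.2 + d]).foldl (fun saved_times y =>
        if 0 ≤ x ∧ x < pvRow0Len grid ∧ 0 ≤ y ∧ y < (grid.length : Int) then
          if (PySem.Str.pyGet? ((PySem.List.pyGet? grid y).getD "") x).getD '_' ∈ "SE.".toList ∧ (x, y) ∈ path then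
            if ((PySem.List.index? path pos).getD 0 : Int) < ((PySem.List.index? path (x, y)).getD 0 : Int) then
              saved_times.insert (((PySem.List.index? path (x, y)).getD 0 : Int) - ((PySem.List.index? path pos).getD 0 : Int) - i)
                (saved_times.getD (((PySem.List.index? path (x, y)).getD 0 : Int) - ((PySem.List.index? path pos).getD 0 : Int) - i) 0 + 1)
            else saved_times
          else saved_times
        else saved_times) saved_times) st
    = (pvCells pos i grid).foldl (pvCell pos path grid i) st := by
  unfold pvCells
  rw [List.flatMap_def, List.foldl_flatten, List.foldl_map]
  refine Eq.symm (PySem.List.foldl_congr_mem _ _ _ _ ?_)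
  intro acc dx _
  rw [List.foldl_map]
  rw [← PySem.List.foldl_ite_eq_foldl_filter
    (p := fun y => 0 ≤ pos.1 + dx ∧ pos.1 + dx < pvRow0Len grid ∧ 0 ≤ y ∧ y < (grid.length : Int))
    (f := fun st y => pvCell pos path grid i st (pos.1 + dx, y))]
  rfl

-- ===== VERDICT (by name: the statement is the Claim_ definition above) =====
theorem evaluate_shortcuts_spec : Claim_equal_evaluate_shortcuts := by
  intro pos path grid _ _
  unfold Spec_evaluate_shortcuts evaluate_shortcuts evaluate_shortcuts_alt
  refine congrArg PySem.Dict.items ?_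
  refine PySem.List.foldl_congr_mem _ _ _ _ ?_
  intro st i hi
  rw [PySem.List.mem_pyRange_one] at hi
  rw [pv_stepA_eq pos path grid i st, pv_stepB_eq pos path grid i st]
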